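-- pv_equiv track=rewrite | github.com/HoffKath/Scripts | Trabalho1-CDP/controller.py | sequenciaShell
-- ===== SOURCE A (Python) =====
-- def sequenciaShell(lenList):
--     SHEEL = []
--     i = 0
--     while i < lenList:
--         number = 2 ** i
--         if (number >= lenList):
--             break
--         SHEEL.append(int(number))
--         i += 1
--
--     return list(reversed(SHEEL))
-- ===== SOURCE B (Python) =====
-- def sequenciaShell(lenList):
--     if lenList < 1:
--         return []
--     count = (lenList - 1).bit_length()
--     return [2 ** i for i in reversed(range(count))]
-- ===== Notes on version B (the rewrite author's own statement) =====
-- stated objective: idiomatic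
-- what changed: Replaces the ascending while-loop with break and final reversed() by a closed-form bit_length count and one descending comprehension.
import Mathlib
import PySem

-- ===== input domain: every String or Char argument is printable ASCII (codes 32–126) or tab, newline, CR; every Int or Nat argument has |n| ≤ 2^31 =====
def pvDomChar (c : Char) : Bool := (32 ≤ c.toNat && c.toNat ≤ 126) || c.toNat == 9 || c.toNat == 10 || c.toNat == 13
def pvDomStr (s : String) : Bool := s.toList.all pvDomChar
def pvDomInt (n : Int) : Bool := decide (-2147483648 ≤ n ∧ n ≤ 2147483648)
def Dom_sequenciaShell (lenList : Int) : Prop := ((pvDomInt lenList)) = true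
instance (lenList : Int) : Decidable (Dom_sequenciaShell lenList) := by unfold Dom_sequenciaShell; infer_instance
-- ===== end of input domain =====

-- B replaces A's ascending while-loop + break + reversed() by a closed-form
-- bit-length count and a single descending comprehension (idiomatic; same cost).

-- ===== PORT A =====
-- the while loop of A: state (SHEEL, i); i is a nonneg Int throughout (starts 0, only incremented)
def sequenciaShellLoop (lenList i : Int) (SHEEL : List Int) : List Int :=
  if _h : i < lenList then
    let number : Int := 2 ^ i.toNat
    if number ≥ lenList then SHEEL
    else sequenciaShellLoop lenList (i + 1) (SHEEL ++ [number])
  else SHEEL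
termination_by (lenList - i).toNat
decreasing_by omega

def sequenciaShell (lenList : Int) : List Int :=
  (sequenciaShellLoop lenList 0 []).reverse

-- ===== PORT B =====
def sequenciaShell_alt (lenList : Int) : List Int :=
  if lenList < 1 then []
  else
    let count := Nat.size (lenList - 1).toNat   -- (lenList-1).bit_length()
    (List.range count).reverse.map (fun i => (2 : Int) ^ i)

-- ===== PRECONDITION & SPEC =====
def Spec_sequenciaShell (lenList : Int) (out : List Int) : Prop := out = sequenciaShell_alt lenList
instance (lenList : Int) (out : List Int) : Decidable (Spec_sequenciaShell lenList out) := by unfold Spec_sequenciaShell; infer_instance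

-- ===== CLAIM (what is proved, stated in full; the proofs are below) =====
def Claim_equal_sequenciaShell : Prop := ∀ (lenList : Int), Dom_sequenciaShell lenList → Spec_sequenciaShell lenList (sequenciaShell lenList)

-- ===== LEMMAS AND PROOFS =====

-- 2^j < lenList ↔ j < bit_length(lenList-1), for lenList ≥ 1
lemma pow_lt_iff_lt_size (lenList : Int) (hL : 1 ≤ lenList) (j : Nat) :
    (2 : Int) ^ j < lenList ↔ j < Nat.size (lenList - 1).toNat := by
  rw [Nat.lt_size]
  have hcast : ((2 ^ j : Nat) : Int) = (2 : Int) ^ j := by push_cast; ring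
  constructor
  · intro h; omega
  · intro h
    have : ((2 ^ j : Nat) : Int) ≤ ((lenList - 1).toNat : Int) := by exact_mod_cast h
    omega

-- loop invariant: from counter m with m + d = count, the loop appends 2^m … 2^(count-1)
lemma loop_inv (lenList : Int) (hL : 1 ≤ lenList) (d : Nat) :
    ∀ (m : Nat) (S : List Int), m + d = Nat.size (lenList - 1).toNat →
      sequenciaShellLoop lenList (m : Int) S
        = S ++ (List.range' m d).map (fun j => (2 : Int) ^ j) := by
  induction d with
  | zero =>
    intro m S hm
    rw [sequenciaShellLoop]
    have hge : (2 : Int) ^ ((m : Int)).toNat ≥ lenList := by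
      simp only [Int.toNat_natCast, ge_iff_le]
      have := (pow_lt_iff_lt_size lenList hL m).not.mpr (by omega)
      omega
    simp only [Int.toNat_natCast, ge_iff_le] at hge
    simp only [Int.toNat_natCast, List.range'_zero, List.map_nil, List.append_nil]
    split
    all_goals first | rfl | omega
  | succ d ih =>
    intro m S hm
    have hlt : (2 : Int) ^ m < lenList := (pow_lt_iff_lt_size lenList hL m).mpr (by omega)
    have hi : ((m : Int)) < lenList := by
      have : (m : Int) < 2 ^ m := by exact_mod_cast Nat.lt_two_pow_self
      omega
    rw [sequenciaShellLoop]
    simp only [hi, dif_pos, Int.toNat_natCast]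
    rw [if_neg (by omega)]
    have : ((m : Int) + 1) = ((m + 1 : Nat) : Int) := by push_cast; ring
    rw [this, ih (m + 1) (S ++ [(2:Int) ^ m]) (by omega), List.range'_succ]
    simp

-- ===== VERDICT (by name: the statement is the Claim_ definition above) =====
theorem sequenciaShell_spec : Claim_equal_sequenciaShell := by
  intro lenList _
  unfold Spec_sequenciaShell sequenciaShell sequenciaShell_alt
  by_cases hL : lenList < 1
  · rw [sequenciaShellLoop]
    simp [hL]
    omega
  · rw [Int.not_lt] at hL
    rw [if_neg (by omega)]
    have h0 : sequenciaShellLoop lenList ((0 : Nat) : Int) []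
        = [] ++ (List.range' 0 (Nat.size (lenList - 1).toNat)).map (fun j => (2 : Int) ^ j) :=
      loop_inv lenList hL _ 0 [] (by omega)
    simp only [Nat.cast_zero, List.nil_append] at h0
    rw [h0, ← List.range_eq_range', List.map_reverse]
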